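-- pv_equiv track=rewrite | github.com/kklimas/leetcode-daily | january/04.py | better_search
-- ===== SOURCE A (Python) =====
-- def better_search(number):
--     tmp_number = number
--     while tmp_number % 3 != 0 and tmp_number > 0:
--         tmp_number -= 2
--
--     # found number divided by three
--     if tmp_number % 3 == 0:
--         return tmp_number // 3 + (number - tmp_number) // 2
--
--     if tmp_number == 0:
--         return number // 2
--
--     return -1
-- ===== SOURCE B (Python) =====
-- def better_search(number):
--     if number % 3 == 0:
--         return number // 3
--     if number >= 2:
--         return (number + 2) // 3
--     return -1
-- ===== Notes on version B (the rewrite author's own statement) =====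
-- stated objective: simpler
-- what changed: Replaced the subtract-by-2 search loop with a closed-form arithmetic dispatch: n//3 for multiples of 3, ceiling (n+2)//3 for n>=2, else -1.
import Mathlib
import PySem

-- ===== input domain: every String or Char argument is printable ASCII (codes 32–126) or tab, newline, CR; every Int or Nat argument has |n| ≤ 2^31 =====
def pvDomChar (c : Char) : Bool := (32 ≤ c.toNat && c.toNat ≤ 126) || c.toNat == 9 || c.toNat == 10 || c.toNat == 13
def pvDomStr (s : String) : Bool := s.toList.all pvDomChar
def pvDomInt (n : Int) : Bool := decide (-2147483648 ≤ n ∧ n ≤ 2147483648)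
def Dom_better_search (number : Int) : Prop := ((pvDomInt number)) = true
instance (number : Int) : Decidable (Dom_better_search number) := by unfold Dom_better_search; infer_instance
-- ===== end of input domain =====

-- B replaces A's subtract-by-2 search loop with a closed-form arithmetic dispatch (simpler, no loop).

-- ===== PORT A =====
-- the while-loop: subtract 2 while tmp % 3 != 0 and tmp > 0
def betterSearchLoop (tmp : Int) : Int :=
  if PySem.Int.mod tmp 3 ≠ 0 ∧ tmp > 0 then betterSearchLoop (tmp - 2) else tmp
termination_by tmp.toNat
decreasing_by omega

def better_search (number : Int) : Int :=
  let tmp_number := betterSearchLoop number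
  if PySem.Int.mod tmp_number 3 = 0 then
    PySem.Int.floordiv tmp_number 3 + PySem.Int.floordiv (number - tmp_number) 2
  else if tmp_number = 0 then
    PySem.Int.floordiv number 2
  else
    -1

-- ===== PORT B =====
def better_search_alt (number : Int) : Int :=
  if PySem.Int.mod number 3 = 0 then PySem.Int.floordiv number 3
  else if number ≥ 2 then PySem.Int.floordiv (number + 2) 3
  else -1

-- ===== PRECONDITION & SPEC =====
def Spec_better_search (number : Int) (out : Int) : Prop := out = better_search_alt number
instance (number : Int) (out : Int) : Decidable (Spec_better_search number out) := by unfold Spec_better_search; infer_instance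

-- ===== CLAIM (what is proved, stated in full; the proofs are below) =====
def Claim_equal_better_search : Prop := ∀ (number : Int), Dom_better_search number → Spec_better_search number (better_search number)

-- ===== LEMMAS AND PROOFS =====

theorem pymod3 (a : Int) : PySem.Int.mod a 3 = a % 3 :=
  PySem.Int.mod_eq_emod_of_pos (by norm_num)

theorem pydiv3 (a : Int) : PySem.Int.floordiv a 3 = a / 3 :=
  PySem.Int.floordiv_eq_ediv_of_pos (by norm_num)

theorem pydiv2 (a : Int) : PySem.Int.floordiv a 2 = a / 2 :=
  PySem.Int.floordiv_eq_ediv_of_pos (by norm_num)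

theorem loop_stop (n : Int) (h : n % 3 = 0 ∨ n ≤ 0) : betterSearchLoop n = n := by
  rw [betterSearchLoop]
  rw [if_neg]
  rw [pymod3]
  omega

theorem loop_step (n : Int) (h : n % 3 ≠ 0 ∧ n > 0) :
    betterSearchLoop n = betterSearchLoop (n - 2) := by
  rw [betterSearchLoop]
  rw [if_pos]
  rw [pymod3]
  exact h

theorem loop_one : betterSearchLoop 1 = -1 := by
  rw [loop_step 1 (by decide)]
  norm_num
  exact loop_stop (-1) (by decide)

theorem loop_mod2 (n : Int) (h : n % 3 = 2) (hp : 0 < n) : betterSearchLoop n = n - 2 := by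
  rw [loop_step n (by omega), loop_stop (n - 2) (by omega)]

theorem loop_mod1 (n : Int) (h : n % 3 = 1) (hp : 4 ≤ n) : betterSearchLoop n = n - 4 := by
  rw [loop_step n (by omega), loop_step (n - 2) (by omega)]
  rw [loop_stop (n - 2 - 2) (by omega)]
  ring_nf

-- ===== VERDICT (by name: the statement is the Claim_ definition above) =====
theorem better_search_spec : Claim_equal_better_search := by
  intro n _
  show better_search n = better_search_alt n
  unfold better_search better_search_alt
  rcases lt_trichotomy (n % 3) 1 with h | h | h
  · -- n % 3 = 0
    have h0 : n % 3 = 0 := by omega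
    rw [loop_stop n (Or.inl h0)]
    simp only [pymod3, pydiv3, pydiv2, h0, sub_self]
    norm_num
  · -- n % 3 = 1
    by_cases hp : 4 ≤ n
    · rw [loop_mod1 n h hp]
      have hm : (n - 4) % 3 = 0 := by omega
      simp only [pymod3, pydiv3, pydiv2, h, hm]
      norm_num
      omega
    · by_cases h1 : n = 1
      · subst h1
        rw [loop_one]
        decide
      · -- n % 3 = 1, n ≤ 0 actually n < 4 and n ≠ 1 means n ≤ -2
        have hn : n ≤ 0 := by omega
        rw [loop_stop n (Or.inr hn)]
        simp only [pymod3, h]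
        norm_num
        omega
  · -- n % 3 = 2
    have h2 : n % 3 = 2 := by omega
    by_cases hp : 0 < n
    · rw [loop_mod2 n h2 hp]
      have hm : (n - 2) % 3 = 0 := by omega
      simp only [pymod3, pydiv3, pydiv2, h2, hm]
      norm_num
      omega
    · rw [loop_stop n (Or.inr (by omega))]
      simp only [pymod3, h2]
      norm_num
      omega
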